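-- pv_equiv track=rewrite | github.com/vnspoj/code-learn | playground/main.py | remainFib
-- ===== SOURCE A (Python) =====
-- def remainFib(n):
--     n = int(n)
--     f1, f2 = 5, 8
--     j, gj = 1, 4
--     while j < n:
--         l = f1 + 1
--         r = f2 - 1
--         m = r - l + 1
--         nj = j + m
--         if nj >= n:
--             j = n
--             gj = r - (nj - n)
--         else:
--             j = nj
--             gj = r
--         tmp = f2
--         f2 += f1
--         f1 = tmp
--
--     return gj
-- ===== SOURCE B (Python) =====
-- def remainFib(n):
--     n = int(n)
--     if n <= 1:
--         return 4
--     # The answer is the n-th non-Fibonacci number: it equals n plus the count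
--     # of distinct Fibonacci numbers 1,2,3,5,8,... that are <= the answer.
--     a, b, k = 1, 2, 0
--     while n + k >= a:
--         a, b, k = b, a + b, k + 1
--     return n + k
-- ===== Notes on version B (the rewrite author's own statement) =====
-- stated objective: simpler
-- what changed: A walks the intervals between consecutive Fibonacci numbers keeping endpoints l/r, gap size m and current value gj; B instead counts distinct Fibonacci numbers (1,2,3,5,8,...) not exceeding the running answer n+k and returns n+k once the next Fibonacci exceeds it, with a single guard n<=1 -> 4.
import Mathlib
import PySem

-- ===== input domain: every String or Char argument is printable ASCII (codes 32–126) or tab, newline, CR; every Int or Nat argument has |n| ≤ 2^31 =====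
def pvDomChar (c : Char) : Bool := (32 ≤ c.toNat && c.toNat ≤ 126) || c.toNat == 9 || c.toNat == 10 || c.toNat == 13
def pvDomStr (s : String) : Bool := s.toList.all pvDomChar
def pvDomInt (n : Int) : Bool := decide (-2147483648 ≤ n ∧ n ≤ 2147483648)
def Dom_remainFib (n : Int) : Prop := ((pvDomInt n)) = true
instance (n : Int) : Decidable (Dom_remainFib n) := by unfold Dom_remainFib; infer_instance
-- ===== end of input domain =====

-- B replaces A's Fibonacci-interval walk (endpoints l/r, gap bookkeeping, gj) by a plain
-- count of distinct Fibonacci numbers below the answer (simpler, same cost).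

-- ===== PORT A =====
-- A's while loop, fuel-based; fuel 0 returns the current gj (the loop runs at most
-- n.toNat iterations since j strictly increases, proved in the lemmas below).
def remainFibLoop (fuel : Nat) (n f1 f2 j gj : Int) : Int :=
  match fuel with
  | 0 => gj
  | fuel + 1 =>
    if j < n then
      let l := f1 + 1
      let r := f2 - 1
      let m := r - l + 1
      let nj := j + m
      if nj ≥ n then
        remainFibLoop fuel n f2 (f2 + f1) n (r - (nj - n))
      else
        remainFibLoop fuel n f2 (f2 + f1) nj r
    else gj

def remainFib (n : Int) : Int := remainFibLoop n.toNat n 5 8 1 4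

-- ===== PORT B =====
-- B's while loop, fuel-based; fuel 0 returns the current n + k (the loop runs at most
-- n.toNat + 4 iterations since a - k strictly increases).
def remainFibAltLoop (fuel : Nat) (n a b k : Int) : Int :=
  match fuel with
  | 0 => n + k
  | fuel + 1 =>
    if a ≤ n + k then remainFibAltLoop fuel n b (a + b) (k + 1)
    else n + k

def remainFib_alt (n : Int) : Int :=
  if n ≤ 1 then 4 else remainFibAltLoop (n.toNat + 4) n 1 2 0

-- ===== PRECONDITION & SPEC =====
def Spec_remainFib (n : Int) (out : Int) : Prop := out = remainFib_alt n
instance (n : Int) (out : Int) : Decidable (Spec_remainFib n out) := by unfold Spec_remainFib; infer_instance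

-- ===== CLAIM (what is proved, stated in full; the proofs are below) =====
def Claim_equal_remainFib : Prop := ∀ (n : Int), Dom_remainFib n → Spec_remainFib n (remainFib n)

-- ===== LEMMAS AND PROOFS =====

-- once j ≥ n, A's loop returns gj whatever the fuel
theorem loopA_done (f : Nat) (n f1 f2 j gj : Int) (h : ¬ j < n) :
    remainFibLoop f n f1 f2 j gj = gj := by
  cases f <;> simp [remainFibLoop, h]

-- lockstep: A's state (f1, f2, j) with j = f1 - k corresponds to B's state (f2, f1 + f2, k);
-- the exit conditions coincide and both return n + k.
theorem loop_eq (f : Nat) : ∀ (n f1 f2 j gj k : Int), j = f1 - k → j < n →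
    2 ≤ f1 → f1 + 2 ≤ f2 → (n - j).toNat < f →
    remainFibLoop f n f1 f2 j gj = remainFibAltLoop f n f2 (f1 + f2) k := by
  induction f with
  | zero => intro n f1 f2 j gj k _ hjn _ _ hfuel; omega
  | succ f ih =>
    intro n f1 f2 j gj k hj hjn hf1 hf2 hfuel
    simp only [remainFibLoop, remainFibAltLoop, if_pos hjn]
    by_cases hex : j + (f2 - 1 - (f1 + 1) + 1) ≥ n
    · -- A exits inside the body; B's guard fails
      rw [if_pos hex, if_neg (by omega : ¬ f2 ≤ n + k), loopA_done _ _ _ _ _ _ (by omega)]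
      omega
    · -- both loops continue, relation preserved
      rw [if_neg hex, if_pos (by omega : f2 ≤ n + k)]
      have hb : f2 + (f1 + f2) = f2 + f2 + f1 := by ring
      rw [hb]
      have := ih n f2 (f2 + f1) (j + (f2 - 1 - (f1 + 1) + 1)) (f2 - 1) (k + 1)
        (by omega) (by omega) (by omega) (by omega) (by omega)
      calc remainFibLoop f n f2 (f2 + f1) (j + (f2 - 1 - (f1 + 1) + 1)) (f2 - 1)
          = remainFibAltLoop f n (f2 + f1) (f2 + (f2 + f1)) (k + 1) := this
        _ = remainFibAltLoop f n (f1 + f2) (f2 + f2 + f1) (k + 1) := by ring_nf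

-- ===== VERDICT (by name: the statement is the Claim_ definition above) =====
theorem remainFib_spec : Claim_equal_remainFib := by
  intro n _
  unfold Spec_remainFib remainFib remainFib_alt
  by_cases h1 : n ≤ 1
  · rw [if_pos h1, loopA_done _ _ _ _ _ _ (by omega)]
  · rw [if_neg h1]
    -- peel B's four alignment iterations: (1,2,0) → (2,3,1) → (3,5,2) → (5,8,3) → (8,13,4)
    show remainFibLoop n.toNat n 5 8 1 4
        = remainFibAltLoop (n.toNat + 3 + 1) n 1 2 0
    rw [remainFibAltLoop, if_pos (by omega : (1:Int) ≤ n + 0)]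
    rw [remainFibAltLoop, if_pos (by omega : (2:Int) ≤ n + (0 + 1))]
    rw [remainFibAltLoop, if_pos (by omega : (1 + 2:Int) ≤ n + (0 + 1 + 1))]
    rw [remainFibAltLoop, if_pos (by omega : (2 + (1 + 2):Int) ≤ n + (0 + 1 + 1 + 1))]
    have := loop_eq n.toNat n 5 8 1 4 4 (by omega) (by omega) (by omega) (by omega) (by omega)
    calc remainFibLoop n.toNat n 5 8 1 4
        = remainFibAltLoop n.toNat n 8 (5 + 8) 4 := this
      _ = remainFibAltLoop n.toNat n (1 + 2 + (2 + (1 + 2))) (2 + (1 + 2) + (1 + 2 + (2 + (1 + 2)))) (0 + 1 + 1 + 1 + 1) := by norm_num
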